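-- pv_equiv track=rewrite | github.com/inseokLee999/CodingTest | python/8 실전문제/8-7.py | solve
-- ===== SOURCE A (Python) =====
-- def solve(n,k,a,B):
--     if a==n:
--         return 0
--     nxt=[]
--     for b in range(a+1,a+k+1):
--         if b>n:
--             break
--         if B[b]==1:
--             continue
--         nxt.append(solve(n,k,b,B))
--     if len(nxt)==0:
--         return 0
--     nxt.sort()
--     if nxt[0]>0:
--         return -(nxt[-1]+1)
--     ret=None
--     for i in range(len(nxt)):
--         if nxt[i]<=0:
--             ret=nxt[i]
--     return -ret + 1
-- ===== SOURCE B (Python) =====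
-- def solve(n, k, a, B):
--     # Top-down with a memo table keyed by position, combining child values with
--     # running min/max accumulators instead of sorting a list.
--     memo = {}
--
--     def val(p):
--         if p == n:
--             return 0
--         if p in memo:
--             return memo[p]
--         mn = mx = mp = None
--         for b in range(p + 1, p + k + 1):
--             if b > n:
--                 break
--             if B[b] == 1:
--                 continue
--             v = val(b)
--             if mn is None or v < mn:
--                 mn = v
--             if mx is None or v > mx:
--                 mx = v
--             if v <= 0 and (mp is None or v > mp):
--                 mp = v
--         if mn is None:
--             r = 0
--         elif mn > 0:
--             r = -(mx + 1)
--         else: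
--             r = 1 - mp
--         memo[p] = r
--         return r
--
--     return val(a)
-- ===== Notes on version B (the rewrite author's own statement) =====
-- stated objective: alternative
-- what changed: B memoizes the game value per position in a dict (top-down DP instead of A's plain recursion) and combines child values with running min/max accumulators in the scan instead of building and sorting a list.
-- outside the precondition, e.g. on solve(2, 1, 0, [0, 1]): A returns 0, B returns 0
import Mathlib
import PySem

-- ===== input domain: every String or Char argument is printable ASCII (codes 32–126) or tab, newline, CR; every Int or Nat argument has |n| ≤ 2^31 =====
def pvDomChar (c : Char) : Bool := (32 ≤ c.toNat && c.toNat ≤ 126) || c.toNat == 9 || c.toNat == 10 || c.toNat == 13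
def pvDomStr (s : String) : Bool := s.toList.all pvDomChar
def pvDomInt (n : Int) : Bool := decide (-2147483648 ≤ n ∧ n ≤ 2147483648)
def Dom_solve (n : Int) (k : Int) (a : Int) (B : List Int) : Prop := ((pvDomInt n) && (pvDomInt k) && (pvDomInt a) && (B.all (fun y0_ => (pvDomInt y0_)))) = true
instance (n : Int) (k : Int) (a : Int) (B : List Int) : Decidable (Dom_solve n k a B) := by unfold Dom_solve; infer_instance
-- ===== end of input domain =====

-- B memoizes the game value per position in a dict (top-down DP instead of A's plain
-- recursion) and combines child values with running min/max accumulators instead of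
-- building and sorting a list.

-- ===== PORT A =====
mutual
-- the for-loop of A building nxt: fuel = remaining iterations of range(a+1, a+k+1)
def solveNxt (n : Int) (k : Int) (B : List Int) (fuel : Nat) (b : Int) : List Int :=
  match fuel with
  | 0 => []
  | f + 1 =>
    if b > n then []
    else if PySem.List.pyGetD B b 0 = 1 then solveNxt n k B f (b + 1)
    else solve n k b B :: solveNxt n k B f (b + 1)
  termination_by ((n - b + 1).toNat, 0, fuel)
  decreasing_by
  · apply Prod.Lex.left; omega
  · apply Prod.Lex.left; omega
  · apply Prod.Lex.left; omega

def solve (n : Int) (k : Int) (a : Int) (B : List Int) : Int :=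
  if a = n then 0
  else
    let nxt := solveNxt n k B k.toNat (a + 1)
    if nxt = [] then 0
    else
      let s := PySem.List.sorted nxt (fun x => x) false
      if PySem.List.pyGetD s 0 0 > 0 then
        -(PySem.List.pyGetD s (-1) 0 + 1)
      else
        let ret := (PySem.List.pyRange 0 (PySem.List.len s) 1).foldl
          (fun r i => if PySem.List.pyGetD s i 0 ≤ 0 then some (PySem.List.pyGetD s i 0) else r)
          (none : Option Int)
        match ret with
        | some v => -v + 1
        | none => 0
  termination_by ((n - a).toNat, 1, 0)
  decreasing_by
  · have h1 : n - (a + 1) + 1 = n - a := by omega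
    rw [h1]
    apply Prod.Lex.right
    apply Prod.Lex.left
    omega
end

-- ===== PORT B =====
-- the running accumulators of B's loop: 'if mn is None or v < mn: mn = v' etc.
def updMin (o : Option Int) (v : Int) : Option Int :=
  match o with
  | none => some v
  | some m => if v < m then some v else some m

def updMax (o : Option Int) (v : Int) : Option Int :=
  match o with
  | none => some v
  | some m => if v > m then some v else some m

-- 'if v <= 0 and (mp is None or v > mp): mp = v'
def updMP (o : Option Int) (v : Int) : Option Int :=
  if v ≤ 0 then updMax o v else o

def stepAcc (acc : Option Int × Option Int × Option Int) (v : Int) :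
    Option Int × Option Int × Option Int :=
  (updMin acc.1 v, updMax acc.2.1 v, updMP acc.2.2 v)

mutual
-- B's for-loop over b in range(p+1, p+k+1), threading (mn, mx, mp) and the memo dict
def bLoop (n : Int) (k : Int) (B : List Int) (fuel : Nat) (b : Int)
    (acc : Option Int × Option Int × Option Int) (memo : PySem.Dict Int Int) :
    (Option Int × Option Int × Option Int) × PySem.Dict Int Int :=
  match fuel with
  | 0 => (acc, memo)
  | f + 1 =>
    if b > n then (acc, memo)
    else if PySem.List.pyGetD B b 0 = 1 then bLoop n k B f (b + 1) acc memo
    else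
      let r := bVal n k B b memo
      bLoop n k B f (b + 1) (stepAcc acc r.1) r.2
  termination_by ((n - b + 1).toNat, 0, fuel)
  decreasing_by
  · apply Prod.Lex.left; omega
  · apply Prod.Lex.left; omega
  · apply Prod.Lex.left; omega

-- B's val(p): memo lookup, else run the loop and combine the accumulators
def bVal (n : Int) (k : Int) (B : List Int) (p : Int) (memo : PySem.Dict Int Int) :
    Int × PySem.Dict Int Int :=
  if p = n then (0, memo)
  else
    match PySem.Dict.get? memo p with
    | some v => (v, memo)
    | none =>
      let res := bLoop n k B k.toNat (p + 1) (none, none, none) memo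
      let r : Int :=
        match res.1.1 with
        | none => 0
        | some m => if m > 0 then -(res.1.2.1.getD 0 + 1) else 1 - res.1.2.2.getD 0
      (r, PySem.Dict.insert res.2 p r)
  termination_by ((n - p).toNat, 1, 0)
  decreasing_by
  · have h1 : n - (p + 1) + 1 = n - p := by omega
    rw [h1]
    apply Prod.Lex.right
    apply Prod.Lex.left
    omega
end

def solve_alt (n : Int) (k : Int) (a : Int) (B : List Int) : Int :=
  (bVal n k B a (PySem.Dict.ofList [])).1

-- ===== PRECONDITION & SPEC =====
-- Pre_ excludes inputs on which an index in the scanned window (a, n] can fall outside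
-- B's Python index range: on every REACHED such index A raises IndexError (and B, which
-- scans the identical indexes, raises there too); on the part of this region where
-- blocked cells stop both scans before the bad index, A and B still agree — it is
-- excluded only because exact reachability is not a closed-form condition.
def Pre_solve (n : Int) (k : Int) (a : Int) (B : List Int) : Prop :=
  n ≤ a ∨ k ≤ 0 ∨ (-(B.length : Int) ≤ a + 1 ∧ n < (B.length : Int))
instance (n : Int) (k : Int) (a : Int) (B : List Int) : Decidable (Pre_solve n k a B) := by
  unfold Pre_solve; infer_instance

def pvWitness_solve : Int × Int × Int × List Int := (3, 2, 0, [0, 0, 1, 0])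

def Spec_solve (n : Int) (k : Int) (a : Int) (B : List Int) (out : Int) : Prop :=
  out = solve_alt n k a B
instance (n : Int) (k : Int) (a : Int) (B : List Int) (out : Int) :
    Decidable (Spec_solve n k a B out) := by unfold Spec_solve; infer_instance

-- ===== CLAIM (what is proved, stated in full; the proofs are below) =====
def Claim_equal_solve : Prop := ∀ (n : Int) (k : Int) (a : Int) (B : List Int),
  Dom_solve n k a B → Pre_solve n k a B → Spec_solve n k a B (solve n k a B)

-- ===== LEMMAS AND PROOFS =====

-- A's combination of the child list (sort, head test, last-nonpositive scan), named
def aCombine (l : List Int) : Int :=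
  let s := PySem.List.sorted l (fun x => x) false
  if PySem.List.pyGetD s 0 0 > 0 then
    -(PySem.List.pyGetD s (-1) 0 + 1)
  else
    let ret := (PySem.List.pyRange 0 (PySem.List.len s) 1).foldl
      (fun r i => if PySem.List.pyGetD s i 0 ≤ 0 then some (PySem.List.pyGetD s i 0) else r)
      (none : Option Int)
    match ret with
    | some v => -v + 1
    | none => 0

theorem solve_eq_combine (n k a : Int) (B : List Int) :
    solve n k a B =
      if a = n then 0
      else
        let nxt := solveNxt n k B k.toNat (a + 1)
        if nxt = [] then 0 else aCombine nxt := by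
  rw [solve.eq_def]; rfl

-- last element of a ≤-sorted list bounds every element
theorem le_getLast_of_pairwise (l : List Int) (h : l.Pairwise (· ≤ ·)) (hne : l ≠ []) :
    ∀ x ∈ l, x ≤ l.getLast hne := by
  induction l with
  | nil => simp
  | cons a t ih =>
    intro x hx
    rcases List.pairwise_cons.mp h with ⟨ha, ht⟩
    cases t with
    | nil =>
      simp only [List.mem_singleton] at hx
      simp [hx]
    | cons b t' =>
      rw [List.getLast_cons (by simp)]
      rcases List.mem_cons.mp hx with rfl | hx'
      · exact ha _ (List.getLast_mem _)
      · exact ih ht (by simp) x hx'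

-- a "keep the last non-positive element" fold is getLast? of the filtered list
theorem foldl_last_nonpos (s : List Int) :
    ∀ init : Option Int,
      s.foldl (fun r x => if x ≤ 0 then some x else r) init =
        match (s.filter (fun x => decide (x ≤ 0))).getLast? with
        | some v => some v
        | none => init := by
  induction s with
  | nil => intro init; rfl
  | cons a t ih =>
    intro init
    rw [List.foldl_cons, List.filter_cons]
    by_cases hp : a ≤ 0
    · rw [if_pos hp, if_pos (by simpa using hp), ih (some a)]
      cases hft : (t.filter (fun x => decide (x ≤ 0))) with
      | nil => simp
      | cons b u =>
        cases h2 : (b :: u).getLast? with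
        | none => simp at h2
        | some w => rw [List.getLast?_cons_cons, h2]
    · rw [if_neg hp, if_neg (by simpa using hp), ih init]

-- values of two extremal elements coincide
theorem max_val_unique {l : List Int} {x y : Int} (hx : x ∈ l) (hy : y ∈ l)
    (hxm : ∀ z ∈ l, z ≤ x) (hym : ∀ z ∈ l, z ≤ y) : x = y :=
  le_antisymm (hym x hx) (hxm y hy)

-- aCombine when the minimum is positive: -(max + 1)
theorem aCombine_min_pos (l : List Int) (hne : l ≠ []) (m M : Int)
    (hm : m ∈ l) (hmin : ∀ x ∈ l, m ≤ x) (hM : M ∈ l) (hmax : ∀ x ∈ l, x ≤ M)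
    (hpos : 0 < m) : aCombine l = -(M + 1) := by
  rw [aCombine]
  set s := PySem.List.sorted l (fun x => x) false with hs
  have hperm : s.Perm l := PySem.List.sorted_perm l _ _
  have hsne : s ≠ [] := by
    rw [hs, Ne, PySem.List.sorted_eq_nil_iff]; exact hne
  have hpw : s.Pairwise (· ≤ ·) := PySem.List.sorted_pairwise l (fun x => x)
  obtain ⟨h0, t, hst⟩ := List.exists_cons_of_ne_nil hsne
  have hhead : PySem.List.pyGetD s 0 0 = h0 := by
    rw [hst]; exact PySem.List.pyGetD_zero_cons h0 t 0
  have hh_mem : h0 ∈ l := hperm.mem_iff.mp (by simp [hst])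
  have hh_min : ∀ y ∈ l, h0 ≤ y := PySem.List.key_head_sorted_le l _ (hs ▸ hst)
  have hh_eq : h0 = m := le_antisymm (hh_min m hm) (hmin h0 hh_mem)
  rw [if_pos (by rw [hhead, hh_eq]; exact hpos)]
  have hL : PySem.List.pyGetD s (-1) 0 = s.getLast hsne :=
    PySem.List.pyGetD_neg_one s 0 hsne
  have hL_mem : s.getLast hsne ∈ l := hperm.mem_iff.mp (List.getLast_mem hsne)
  have hL_max : ∀ y ∈ l, y ≤ s.getLast hsne := fun y hy =>
    le_getLast_of_pairwise s hpw hsne y (hperm.mem_iff.mpr hy)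
  rw [hL, max_val_unique hL_mem hM hL_max hmax]

-- aCombine when the minimum is non-positive: -(max nonpositive) + 1
theorem aCombine_min_nonpos (l : List Int) (m P : Int)
    (hm : m ∈ l) (hmin : ∀ x ∈ l, m ≤ x) (hm0 : m ≤ 0)
    (hP : P ∈ l.filter (fun x => decide (x ≤ 0)))
    (hPmax : ∀ x ∈ l.filter (fun x => decide (x ≤ 0)), x ≤ P) :
    aCombine l = 1 - P := by
  have hne : l ≠ [] := by intro h; rw [h] at hm; simp at hm
  rw [aCombine]
  set s := PySem.List.sorted l (fun x => x) false with hs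
  have hperm : s.Perm l := PySem.List.sorted_perm l _ _
  have hsne : s ≠ [] := by
    rw [hs, Ne, PySem.List.sorted_eq_nil_iff]; exact hne
  have hpw : s.Pairwise (· ≤ ·) := PySem.List.sorted_pairwise l (fun x => x)
  obtain ⟨h0, t, hst⟩ := List.exists_cons_of_ne_nil hsne
  have hhead : PySem.List.pyGetD s 0 0 = h0 := by
    rw [hst]; exact PySem.List.pyGetD_zero_cons h0 t 0
  have hh_mem : h0 ∈ l := hperm.mem_iff.mp (by simp [hst])
  have hh_le : h0 ≤ 0 := le_trans (PySem.List.key_head_sorted_le l _ (hs ▸ hst) m hm) hm0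
  rw [if_neg (by rw [hhead]; omega)]
  simp only [PySem.List.foldl_pyRange_zero_pyGetD s 0
    (fun r x => if x ≤ 0 then some x else r) none, foldl_last_nonpos]
  have hmem_f : h0 ∈ s.filter (fun x => decide (x ≤ 0)) := by
    rw [List.mem_filter]
    exact ⟨by simp [hst], by simpa using hh_le⟩
  have hfne : s.filter (fun x => decide (x ≤ 0)) ≠ [] := by
    intro h; rw [h] at hmem_f; simp at hmem_f
  obtain ⟨L, hL⟩ : ∃ L, (s.filter (fun x => decide (x ≤ 0))).getLast? = some L := by
    cases h : (s.filter (fun x => decide (x ≤ 0))).getLast? with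
    | none => exact absurd (List.getLast?_eq_none_iff.mp h) hfne
    | some L => exact ⟨L, rfl⟩
  rw [hL]
  have hLmem : L ∈ s.filter (fun x => decide (x ≤ 0)) := List.mem_of_getLast? hL
  have hpwf : (s.filter (fun x => decide (x ≤ 0))).Pairwise (· ≤ ·) := hpw.filter _
  have hLmax : ∀ x ∈ s.filter (fun x => decide (x ≤ 0)), x ≤ L := by
    have hgl : (s.filter (fun x => decide (x ≤ 0))).getLast hfne = L := by
      have h2 := List.getLast?_eq_some_getLast hfne
      rw [hL] at h2
      exact (Option.some_inj.mp h2.symm)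
    intro x hx
    rw [← hgl]
    exact le_getLast_of_pairwise _ hpwf hfne x hx
  have hpermf : (s.filter (fun x => decide (x ≤ 0))).Perm
      (l.filter (fun x => decide (x ≤ 0))) := hperm.filter _
  have hLP : L = P :=
    max_val_unique (hpermf.mem_iff.mp hLmem) hP
      (fun x hx => hLmax x (hpermf.mem_iff.mpr hx)) hPmax
  simp only [hLP]
  omega

-- the triple fold splits into its three component folds
theorem foldl_stepAcc_split (l : List Int) :
    ∀ acc : Option Int × Option Int × Option Int,
      l.foldl stepAcc acc = (l.foldl updMin acc.1, l.foldl updMax acc.2.1, l.foldl updMP acc.2.2) := by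
  induction l with
  | nil => intro acc; rfl
  | cons a t ih => intro acc; rw [List.foldl_cons, ih]; rfl

theorem foldl_updMin_some (l : List Int) :
    ∀ m0 : Int, ∃ m, l.foldl updMin (some m0) = some m ∧ (m = m0 ∨ m ∈ l) ∧ m ≤ m0 ∧
      ∀ x ∈ l, m ≤ x := by
  induction l with
  | nil => intro m0; exact ⟨m0, rfl, Or.inl rfl, le_refl _, by simp⟩
  | cons a t ih =>
    intro m0
    rw [List.foldl_cons]
    by_cases h : a < m0
    · rw [show updMin (some m0) a = some a by simp [updMin, h]]
      obtain ⟨m, h1, h2, h3, h4⟩ := ih a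
      exact ⟨m, h1, Or.inr (by rcases h2 with h2 | h2 <;> simp [h2]), by omega,
        fun x hx => by rcases List.mem_cons.mp hx with rfl | hx' <;> [omega; exact h4 x hx']⟩
    · rw [show updMin (some m0) a = some m0 by simp [updMin, h]]
      obtain ⟨m, h1, h2, h3, h4⟩ := ih m0
      exact ⟨m, h1, by rcases h2 with h2 | h2 <;> simp [h2], h3,
        fun x hx => by rcases List.mem_cons.mp hx with rfl | hx' <;> [omega; exact h4 x hx']⟩

theorem foldl_updMax_some (l : List Int) :
    ∀ m0 : Int, ∃ m, l.foldl updMax (some m0) = some m ∧ (m = m0 ∨ m ∈ l) ∧ m0 ≤ m ∧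
      ∀ x ∈ l, x ≤ m := by
  induction l with
  | nil => intro m0; exact ⟨m0, rfl, Or.inl rfl, le_refl _, by simp⟩
  | cons a t ih =>
    intro m0
    rw [List.foldl_cons]
    by_cases h : a > m0
    · rw [show updMax (some m0) a = some a by simp [updMax, h]]
      obtain ⟨m, h1, h2, h3, h4⟩ := ih a
      exact ⟨m, h1, Or.inr (by rcases h2 with h2 | h2 <;> simp [h2]), by omega,
        fun x hx => by rcases List.mem_cons.mp hx with rfl | hx' <;> [omega; exact h4 x hx']⟩
    · rw [show updMax (some m0) a = some m0 by simp [updMax, h]]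
      obtain ⟨m, h1, h2, h3, h4⟩ := ih m0
      exact ⟨m, h1, by rcases h2 with h2 | h2 <;> simp [h2], h3,
        fun x hx => by rcases List.mem_cons.mp hx with rfl | hx' <;> [omega; exact h4 x hx']⟩

theorem foldl_updMin_none (l : List Int) (hne : l ≠ []) :
    ∃ m, l.foldl updMin none = some m ∧ m ∈ l ∧ ∀ x ∈ l, m ≤ x := by
  obtain ⟨a, t, rfl⟩ := List.exists_cons_of_ne_nil hne
  rw [List.foldl_cons, show updMin none a = some a from rfl]
  obtain ⟨m, h1, h2, h3, h4⟩ := foldl_updMin_some t a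
  exact ⟨m, h1, by rcases h2 with h2 | h2 <;> simp [h2],
    fun x hx => by rcases List.mem_cons.mp hx with rfl | hx' <;> [omega; exact h4 x hx']⟩

theorem foldl_updMax_none (l : List Int) (hne : l ≠ []) :
    ∃ m, l.foldl updMax none = some m ∧ m ∈ l ∧ ∀ x ∈ l, x ≤ m := by
  obtain ⟨a, t, rfl⟩ := List.exists_cons_of_ne_nil hne
  rw [List.foldl_cons, show updMax none a = some a from rfl]
  obtain ⟨m, h1, h2, h3, h4⟩ := foldl_updMax_some t a
  exact ⟨m, h1, by rcases h2 with h2 | h2 <;> simp [h2],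
    fun x hx => by rcases List.mem_cons.mp hx with rfl | hx' <;> [omega; exact h4 x hx']⟩

-- the mp accumulator is a max-fold over the non-positive elements
theorem foldl_updMP_eq_filter (l : List Int) :
    ∀ o : Option Int, l.foldl updMP o = (l.filter (fun v => decide (v ≤ 0))).foldl updMax o := by
  induction l with
  | nil => intro o; rfl
  | cons a t ih =>
    intro o
    rw [List.foldl_cons, List.filter_cons]
    by_cases h : a ≤ 0
    · rw [if_pos (by simpa using h), List.foldl_cons, show updMP o a = updMax o a by
        simp [updMP, h], ih]
    · rw [if_neg (by simpa using h), show updMP o a = o by simp [updMP, h], ih]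

-- B's combine of the accumulators equals A's sort-based combine
theorem combine_correct (l : List Int) :
    (match (l.foldl stepAcc ((none, none, none) : Option Int × Option Int × Option Int)).1 with
      | none => 0
      | some m => if m > 0 then
          -((l.foldl stepAcc ((none, none, none) : Option Int × Option Int × Option Int)).2.1.getD 0 + 1)
        else
          1 - (l.foldl stepAcc ((none, none, none) : Option Int × Option Int × Option Int)).2.2.getD 0)
      = if l = [] then 0 else aCombine l := by
  rw [foldl_stepAcc_split]
  by_cases hne : l = []
  · subst hne; rfl
  · rw [if_neg hne]
    obtain ⟨m, hm1, hm2, hm3⟩ := foldl_updMin_none l hne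
    obtain ⟨M, hM1, hM2, hM3⟩ := foldl_updMax_none l hne
    simp only [hm1, hM1]
    by_cases hpos : m > 0
    · rw [if_pos hpos]
      simp only [Option.getD_some]
      exact (aCombine_min_pos l hne m M hm2 hm3 hM2 hM3 hpos).symm
    · rw [if_neg hpos]
      have hm0 : m ≤ 0 := by omega
      have hfne : l.filter (fun v => decide (v ≤ 0)) ≠ [] := by
        intro h
        have : m ∈ l.filter (fun v => decide (v ≤ 0)) :=
          List.mem_filter.mpr ⟨hm2, by simpa using hm0⟩
        rw [h] at this; simp at this
      obtain ⟨P, hP1, hP2, hP3⟩ := foldl_updMax_none _ hfne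
      rw [foldl_updMP_eq_filter]
      simp only [hP1, Option.getD_some]
      exact (aCombine_min_nonpos l m P hm2 hm3 hm0 hP2 hP3).symm

-- every memo entry holds the corresponding game value
def MemoOK (n : Int) (k : Int) (B : List Int) (memo : PySem.Dict Int Int) : Prop :=
  ∀ p v, PySem.Dict.get? memo p = some v → v = solve n k p B

mutual
theorem bLoop_spec (n : Int) (k : Int) (B : List Int) (fuel : Nat) (b : Int)
    (acc : Option Int × Option Int × Option Int) (memo : PySem.Dict Int Int)
    (h : MemoOK n k B memo) :
    (bLoop n k B fuel b acc memo).1 = (solveNxt n k B fuel b).foldl stepAcc acc ∧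
      MemoOK n k B (bLoop n k B fuel b acc memo).2 := by
  match fuel with
  | 0 =>
    rw [bLoop, solveNxt]
    exact ⟨rfl, h⟩
  | f + 1 =>
    rw [bLoop, solveNxt]
    by_cases hb : b > n
    · simp only [if_pos hb]
      exact ⟨rfl, h⟩
    · simp only [if_neg hb]
      by_cases hB : PySem.List.pyGetD B b 0 = 1
      · simp only [if_pos hB]
        exact bLoop_spec n k B f (b + 1) acc memo h
      · simp only [if_neg hB]
        have hv := bVal_spec n k B b memo h
        rw [List.foldl_cons, ← hv.1]
        exact bLoop_spec n k B f (b + 1) (stepAcc acc (bVal n k B b memo).1)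
          (bVal n k B b memo).2 hv.2
  termination_by ((n - b + 1).toNat, 0, fuel)
  decreasing_by
  · apply Prod.Lex.left; omega
  · apply Prod.Lex.left; omega
  · apply Prod.Lex.left; omega

theorem bVal_spec (n : Int) (k : Int) (B : List Int) (p : Int) (memo : PySem.Dict Int Int)
    (h : MemoOK n k B memo) :
    (bVal n k B p memo).1 = solve n k p B ∧ MemoOK n k B (bVal n k B p memo).2 := by
  rw [bVal]
  by_cases hp : p = n
  · simp only [if_pos hp]
    rw [solve_eq_combine, if_pos hp]
    exact ⟨rfl, h⟩
  · simp only [if_neg hp]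
    cases hmem : PySem.Dict.get? memo p with
    | some v =>
      exact ⟨h p v hmem, h⟩
    | none =>
      have hloop := bLoop_spec n k B k.toNat (p + 1) (none, none, none) memo h
      have hval :
          (match (bLoop n k B k.toNat (p + 1) (none, none, none) memo).1.1 with
            | none => 0
            | some m => if m > 0 then
                -((bLoop n k B k.toNat (p + 1) (none, none, none) memo).1.2.1.getD 0 + 1)
              else
                1 - (bLoop n k B k.toNat (p + 1) (none, none, none) memo).1.2.2.getD 0)
            = solve n k p B := by
        rw [hloop.1, combine_correct, solve_eq_combine n k p B, if_neg hp]
      refine ⟨hval, ?_⟩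
      intro q v hq
      by_cases hqp : q = p
      · subst hqp
        rw [PySem.Dict.get?_insert_self] at hq
        rw [← Option.some_inj.mp hq]
        exact hval
      · rw [PySem.Dict.get?_insert_of_ne _ _ hqp] at hq
        exact hloop.2 q v hq
  termination_by ((n - p).toNat, 1, 0)
  decreasing_by
  · have h1 : n - (p + 1) + 1 = n - p := by omega
    rw [h1]
    apply Prod.Lex.right
    apply Prod.Lex.left
    omega
end

theorem memoOK_empty (n k : Int) (B : List Int) :
    MemoOK n k B (PySem.Dict.ofList []) := by
  intro p v hv
  simp [PySem.Dict.ofList, PySem.Dict.get?, PySem.Dict.update, PySem.Dict.empty,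
    PySem.Dict.items] at hv

-- ===== VERDICT (by name: the statement is the Claim_ definition above) =====
theorem solve_spec : Claim_equal_solve := by
  intro n k a B _ _
  unfold Spec_solve solve_alt
  exact (bVal_spec n k B a (PySem.Dict.ofList []) (memoOK_empty n k B)).1.symm
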